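-- pv_equiv track=rewrite | github.com/Alec8888/advent_of_code | Days/Day9/s2.py | get_fragged_blocks
-- ===== SOURCE A (Python) =====
-- def get_fragged_blocks(disk, size, file_pos):
--     for i in range(len(disk)):
--         if i >= file_pos:
--             break
--         if disk[i] == '.':
--             if all(disk[j] == '.' for j in range(i, i + size) if j < len(disk)):
--                 return i
--     return None
-- ===== SOURCE B (Python) =====
-- def get_fragged_blocks(disk, size, file_pos):
--     n = len(disk)
--     # run[i] = length of the maximal run of '.' starting at i (run[n] = 0)
--     run = [0] * (n + 1)
--     for i in range(n - 1, -1, -1):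
--         run[i] = run[i + 1] + 1 if disk[i] == '.' else 0
--     limit = min(n, file_pos)
--     for i in range(limit):
--         if disk[i] == '.' and run[i] >= min(size, n - i):
--             return i
--     return None
-- ===== Notes on version B (the rewrite author's own statement) =====
-- stated objective: alternative
-- what changed: B precomputes a suffix array of consecutive-dot run lengths in one backward pass and then checks each candidate position against min(size, n-i), instead of A's per-candidate forward window scan.
import Mathlib
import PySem

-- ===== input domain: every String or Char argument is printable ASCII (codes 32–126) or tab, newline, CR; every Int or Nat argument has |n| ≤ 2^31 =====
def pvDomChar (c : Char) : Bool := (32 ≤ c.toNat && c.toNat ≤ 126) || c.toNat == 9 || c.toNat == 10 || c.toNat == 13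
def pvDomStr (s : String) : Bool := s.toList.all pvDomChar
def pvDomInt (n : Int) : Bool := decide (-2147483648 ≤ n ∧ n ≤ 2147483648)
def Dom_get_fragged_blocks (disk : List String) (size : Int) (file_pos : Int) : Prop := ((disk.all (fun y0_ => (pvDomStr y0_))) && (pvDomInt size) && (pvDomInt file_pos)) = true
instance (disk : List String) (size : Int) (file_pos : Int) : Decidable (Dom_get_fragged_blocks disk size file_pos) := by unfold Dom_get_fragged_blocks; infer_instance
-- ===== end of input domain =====

-- B replaces A's per-candidate window rescan by a precomputed suffix array of
-- consecutive-dot run lengths, each candidate then checked against min(size, n-i) (alternative algorithm).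

-- ===== PORT A =====
-- all(disk[j] == '.' for j in range(i, i + size) if j < len(disk))
def pvInnerA (disk : List String) (size : Int) (i : Int) : Bool :=
  ((PySem.List.pyRange i (i + size) 1).filter (fun j => decide (j < (disk.length : Int)))).all
    (fun j => PySem.List.pyGet? disk j == some ".")

-- the 'for i in range(len(disk))' loop with its break / returns
def pvLoopA (disk : List String) (size : Int) (file_pos : Int) : List Int → Option Int
  | [] => none
  | i :: rest =>
    if file_pos ≤ i then none
    else if PySem.List.pyGet? disk i == some "." then
      if pvInnerA disk size i then some i else pvLoopA disk size file_pos rest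
    else pvLoopA disk size file_pos rest

def get_fragged_blocks (disk : List String) (size : Int) (file_pos : Int) : Option Int :=
  pvLoopA disk size file_pos (PySem.List.pyRange 0 (disk.length : Int) 1)

-- ===== PORT B =====
-- the backward loop building run[i] = run[i+1] + 1 if disk[i] == '.' else 0
def pvRuns : List String → List Int
  | [] => []
  | s :: rest =>
    let r := pvRuns rest
    (if s == "." then r.headD 0 + 1 else 0) :: r

-- the 'for i in range(limit)' scan with its run-length condition
def pvLoopB (disk : List String) (run : List Int) (size : Int) : List Int → Option Int
  | [] => none
  | i :: rest =>
    if PySem.List.pyGet? disk i == some "."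
        && decide (min size ((disk.length : Int) - i) ≤ PySem.List.pyGetD run i 0) then some i
    else pvLoopB disk run size rest

def get_fragged_blocks_alt (disk : List String) (size : Int) (file_pos : Int) : Option Int :=
  pvLoopB disk (pvRuns disk) size
    (PySem.List.pyRange 0 (min (disk.length : Int) file_pos) 1)

-- ===== PRECONDITION & SPEC =====
def Spec_get_fragged_blocks (disk : List String) (size : Int) (file_pos : Int) (out : Option Int) : Prop := out = get_fragged_blocks_alt disk size file_pos
instance (disk : List String) (size : Int) (file_pos : Int) (out : Option Int) : Decidable (Spec_get_fragged_blocks disk size file_pos out) := by unfold Spec_get_fragged_blocks; infer_instance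

-- ===== CLAIM (what is proved, stated in full; the proofs are below) =====
def Claim_equal_get_fragged_blocks : Prop := ∀ (disk : List String) (size : Int) (file_pos : Int), Dom_get_fragged_blocks disk size file_pos → Spec_get_fragged_blocks disk size file_pos (get_fragged_blocks disk size file_pos)

-- ===== LEMMAS AND PROOFS =====

theorem pvRuns_length (l : List String) : (pvRuns l).length = l.length := by
  induction l with
  | nil => rfl
  | cons s rest ih => simp [pvRuns, ih]

theorem pvRuns_headD_nonneg (l : List String) : 0 ≤ (pvRuns l).headD 0 := by
  induction l with
  | nil => simp [pvRuns]
  | cons s rest ih =>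
    simp only [pvRuns, List.headD_cons]
    split <;> omega

theorem pvRuns_getElem? (l : List String) (k : Nat) (hk : k < l.length) :
    (pvRuns l)[k]? = some ((pvRuns (l.drop k)).headD 0) := by
  induction l generalizing k with
  | nil => simp at hk
  | cons s rest ih =>
    cases k with
    | zero =>
      cases h : pvRuns (s :: rest) with
      | nil => simp [pvRuns] at h
      | cons a t => simp [h]
    | succ k =>
      simp only [pvRuns, List.getElem?_cons_succ, List.drop_succ_cons]
      exact ih k (by simpa using hk)

theorem pvRuns_char (l : List String) (m : Nat) (hm : m ≤ l.length) :
    ((m : Int) ≤ (pvRuns l).headD 0 ↔ ∀ d < m, l[d]? = some ".") := by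
  induction l generalizing m with
  | nil =>
    have : m = 0 := by simpa using hm
    subst this
    simp [pvRuns]
  | cons s rest ih =>
    cases m with
    | zero =>
      constructor
      · intro _ d hd; exact absurd hd (by omega)
      · intro _; exact_mod_cast pvRuns_headD_nonneg (s :: rest)
    | succ m =>
      have ihm := ih m (by simpa using hm)
      simp only [pvRuns, List.headD_cons]
      by_cases hs : s = "."
      · simp only [hs, BEq.rfl, if_true]
        constructor
        · intro h d hd
          cases d with
          | zero => simp
          | succ d =>
            have hr : (m : Int) ≤ (pvRuns rest).headD 0 := by push_cast at h; omega
            simpa using ihm.mp hr d (by omega)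
        · intro h
          have hr : (m : Int) ≤ (pvRuns rest).headD 0 :=
            ihm.mpr (fun d hd => by simpa using h (d + 1) (by omega))
          push_cast
          omega
      · rw [if_neg (by simpa using hs)]
        constructor
        · intro h
          exfalso
          push_cast at h
          omega
        · intro h
          have := h 0 (by omega)
          simp at this
          exact absurd this hs

theorem pvRuns_pyGetD (disk : List String) (k : Int) (h0 : 0 ≤ k) (hk : k < (disk.length : Int)) :
    PySem.List.pyGetD (pvRuns disk) k 0 = (pvRuns (disk.drop k.toNat)).headD 0 := by
  have hlen : k.toNat < (pvRuns disk).length := by rw [pvRuns_length]; omega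
  rw [PySem.List.pyGetD_eq_getElem (pvRuns disk) 0 h0 (by rw [pvRuns_length]; exact hk)]
  have h := pvRuns_getElem? disk k.toNat (by rw [pvRuns_length] at hlen; exact hlen)
  rw [List.getElem?_eq_getElem hlen] at h
  exact Option.some.inj h

-- the core equivalence: A's window scan ⟺ B's run-length comparison
theorem pvInner_iff (disk : List String) (size : Int) (k : Int)
    (h0 : 0 ≤ k) (hk : k < (disk.length : Int)) :
    (pvInnerA disk size k = true ↔
      min size ((disk.length : Int) - k) ≤ PySem.List.pyGetD (pvRuns disk) k 0) := by
  rw [pvRuns_pyGetD disk k h0 hk]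
  have hLHS : pvInnerA disk size k = true ↔
      ∀ j : Int, k ≤ j → j < k + size → j < (disk.length : Int) →
        PySem.List.pyGet? disk j = some "." := by
    simp only [pvInnerA, List.all_eq_true, List.mem_filter, PySem.List.mem_pyRange_one,
      decide_eq_true_eq, beq_iff_eq]
    constructor
    · intro h j h1 h2 h3; exact h j ⟨⟨h1, h2⟩, h3⟩
    · intro h j hj; exact h j hj.1.1 hj.1.2 hj.2
  rw [hLHS]
  rcases le_or_gt size 0 with hs | hs
  · have h1 : ∀ j : Int, k ≤ j → j < k + size → j < (disk.length : Int) →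
        PySem.List.pyGet? disk j = some "." := by
      intro j h1 h2 _; omega
    have h2 : min size ((disk.length : Int) - k) ≤ (pvRuns (disk.drop k.toNat)).headD 0 :=
      le_trans (le_trans (min_le_left _ _) hs) (pvRuns_headD_nonneg _)
    exact iff_of_true h1 h2
  · set m := (min size ((disk.length : Int) - k)).toNat with hmdef
    have hm1 : (m : Int) = min size ((disk.length : Int) - k) := by
      have : 0 < min size ((disk.length : Int) - k) := lt_min hs (by omega)
      omega
    have hmle : m ≤ (disk.drop k.toNat).length := by
      rw [List.length_drop]; omega
    rw [← hm1, pvRuns_char _ m hmle]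
    constructor
    · intro h d hd
      have hj := h (k + d) (by omega) (by omega) (by omega)
      rw [PySem.List.pyGet?_of_nonneg disk (by omega : (0:Int) ≤ k + d)] at hj
      have ht : (k + (d : Int)).toNat = k.toNat + d := by omega
      rw [ht] at hj
      rw [List.getElem?_drop]
      exact hj
    · intro h j hj1 hj2 hj3
      have hd : (j - k).toNat < m := by omega
      have hdj := h (j - k).toNat hd
      rw [List.getElem?_drop] at hdj
      rw [PySem.List.pyGet?_of_nonneg disk (by omega : (0:Int) ≤ j)]
      have ht : j.toNat = k.toNat + (j - k).toNat := by omega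
      rw [ht]
      exact hdj

theorem pvLoop_eq (disk : List String) (size : Int) (file_pos : Int) :
    ∀ (m : Nat) (k : Int), 0 ≤ k → ((disk.length : Int) - k).toNat = m →
    pvLoopA disk size file_pos (PySem.List.pyRange k (disk.length : Int) 1) =
      pvLoopB disk (pvRuns disk) size
        (PySem.List.pyRange k (min (disk.length : Int) file_pos) 1) := by
  intro m
  induction m with
  | zero =>
    intro k h0 hm
    rw [PySem.List.pyRange_one_eq_nil (by omega),
      PySem.List.pyRange_one_eq_nil (by omega)]
    rfl
  | succ m ih =>
    intro k h0 hm
    have hkN : k < (disk.length : Int) := by omega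
    rw [PySem.List.pyRange_one_cons hkN]
    by_cases hfp : file_pos ≤ k
    · rw [PySem.List.pyRange_one_eq_nil (by omega : min ((disk.length:Int)) file_pos ≤ k)]
      simp only [pvLoopA, pvLoopB, if_pos hfp]
    · rw [PySem.List.pyRange_one_cons (by omega : k < min ((disk.length:Int)) file_pos)]
      have hrec := ih (k + 1) (by omega) (by omega)
      by_cases hdot : PySem.List.pyGet? disk k = some "."
      · have hb : (PySem.List.pyGet? disk k == some ".") = true := by simpa using hdot
        by_cases hin : pvInnerA disk size k = true
        · have hc : decide (min size ((disk.length : Int) - k) ≤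
              PySem.List.pyGetD (pvRuns disk) k 0) = true := by
            simpa using (pvInner_iff disk size k h0 hkN).mp hin
          simp only [pvLoopA, pvLoopB, if_neg hfp, hb, hin, hc]
          simp
        · have hin' : pvInnerA disk size k = false := by simpa using hin
          have hc : decide (min size ((disk.length : Int) - k) ≤
              PySem.List.pyGetD (pvRuns disk) k 0) = false := by
            simp only [decide_eq_false_iff_not]
            intro hle
            exact hin ((pvInner_iff disk size k h0 hkN).mpr hle)
          simp only [pvLoopA, pvLoopB, if_neg hfp, hb, hin', hc]
          simpa using hrec
      · have hb : (PySem.List.pyGet? disk k == some ".") = false := by simpa using hdot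
        simp only [pvLoopA, pvLoopB, if_neg hfp, hb]
        simpa using hrec

-- ===== VERDICT (by name: the statement is the Claim_ definition above) =====
theorem get_fragged_blocks_spec : Claim_equal_get_fragged_blocks := by
  intro disk size file_pos _
  unfold Spec_get_fragged_blocks get_fragged_blocks get_fragged_blocks_alt
  exact pvLoop_eq disk size file_pos disk.length 0 le_rfl (by simp)
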